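-- pv_equiv track=rewrite | github.com/THF151/blocus-engine-cs-630 | backend/example/example_simulation.py | transform
-- ===== SOURCE A (Python) =====
-- def normalize(cells: list[tuple[int, int]]) -> list[tuple[int, int]]:
--     min_row = min(row for row, _ in cells)
--     min_col = min(col for _, col in cells)
--     return sorted((row - min_row, col - min_col) for row, col in cells)
--
-- def transform(
--     cells: list[tuple[int, int]],
--     rotation: int,
--     flip_horizontal: bool,
-- ) -> list[tuple[int, int]]:
--     normalized = normalize(cells)
--     width = max(col for _, col in normalized) + 1
--     height = max(row for row, _ in normalized) + 1
--
--     transformed: list[tuple[int, int]] = []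
--
--     for row, col in normalized:
--         if flip_horizontal:
--             col = width - 1 - col
--
--         if rotation == 0:
--             next_row, next_col = row, col
--         elif rotation == 90:
--             next_row, next_col = col, height - 1 - row
--         elif rotation == 180:
--             next_row, next_col = height - 1 - row, width - 1 - col
--         elif rotation == 270:
--             next_row, next_col = width - 1 - col, row
--         else:
--             raise ValueError(f"unsupported rotation: {rotation}")
--
--         transformed.append((next_row, next_col))
--
--     return normalize(transformed)
-- ===== SOURCE B (Python) =====
-- def normalize(cells):
--     min_row = min(row for row, _ in cells)
--     min_col = min(col for _, col in cells)
--     return sorted((row - min_row, col - min_col) for row, col in cells)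
--
-- def rotate90(cells, height, width):
--     """Rotate 90 degrees clockwise; returns (cells, new_height, new_width)."""
--     return [(c, height - 1 - r) for r, c in cells], width, height
--
-- def transform(cells, rotation, flip_horizontal):
--     cur = normalize(cells)
--     height = max(r for r, _ in cur) + 1
--     width = max(c for _, c in cur) + 1
--     if flip_horizontal:
--         cur = [(r, width - 1 - c) for r, c in cur]
--     if rotation not in (0, 90, 180, 270):
--         raise ValueError(f"unsupported rotation: {rotation}")
--     k = rotation // 90
--     for _ in range(k):
--         cur, height, width = rotate90(cur, height, width)
--     return normalize(cur)
-- ===== Notes on version B (the rewrite author's own statement) =====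
-- stated objective: alternative
-- what changed: Replaces the four-branch closed-form per-cell rotation inside the element loop by flipping the whole list once and then repeatedly applying a single 90-degree rotation primitive rotate90 (with height/width swapped each step) rotation//90 times.
import Mathlib
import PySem

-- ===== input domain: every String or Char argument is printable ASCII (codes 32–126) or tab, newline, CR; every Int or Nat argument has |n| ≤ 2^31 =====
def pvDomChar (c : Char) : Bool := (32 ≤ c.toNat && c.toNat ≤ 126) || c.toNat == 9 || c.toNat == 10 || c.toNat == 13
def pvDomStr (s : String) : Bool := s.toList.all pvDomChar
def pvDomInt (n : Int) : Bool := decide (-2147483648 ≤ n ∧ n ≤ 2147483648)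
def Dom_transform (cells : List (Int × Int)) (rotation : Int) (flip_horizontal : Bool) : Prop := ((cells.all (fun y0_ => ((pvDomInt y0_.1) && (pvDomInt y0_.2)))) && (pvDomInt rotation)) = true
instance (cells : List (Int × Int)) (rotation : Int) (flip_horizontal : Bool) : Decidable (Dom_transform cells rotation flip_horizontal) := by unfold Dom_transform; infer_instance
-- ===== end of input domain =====

-- B flips the whole list once and applies a single rotate90 primitive rotation//90 times (swapping dims each step), instead of A's four-branch closed-form rotation inside the element loop.


-- ===== PORT A =====
-- normalize (shared verbatim by Source A and Source B): min raises on empty cells (excluded by Pre_); .getD 0 is never reached under Pre_.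
def pvNormalizeA (cells : List (Int × Int)) : List (Int × Int) :=
  let min_row := (PySem.List.min? (cells.map (fun p => p.1)) (fun x => x)).getD 0
  let min_col := (PySem.List.min? (cells.map (fun p => p.2)) (fun x => x)).getD 0
  PySem.List.sorted2 (cells.map (fun p => (p.1 - min_row, p.2 - min_col))) (fun p => p.1) (fun p => p.2)

def transform (cells : List (Int × Int)) (rotation : Int) (flip_horizontal : Bool) : List (Int × Int) :=
  let normalized := pvNormalizeA cells
  let width := (PySem.List.max? (normalized.map (fun p => p.2)) (fun x => x)).getD 0 + 1
  let height := (PySem.List.max? (normalized.map (fun p => p.1)) (fun x => x)).getD 0 + 1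
  let transformed := normalized.foldl (fun acc rc =>
    let row := rc.1
    let col := if flip_horizontal then width - 1 - rc.2 else rc.2
    if rotation = 0 then acc ++ [(row, col)]
    else if rotation = 90 then acc ++ [(col, height - 1 - row)]
    else if rotation = 180 then acc ++ [(height - 1 - row, width - 1 - col)]
    else if rotation = 270 then acc ++ [(width - 1 - col, row)]
    else acc  -- Python raises ValueError here; excluded by Pre_
    ) []
  pvNormalizeA transformed

-- ===== PORT B =====
def pvRotate90 (cells : List (Int × Int)) (height width : Int) : List (Int × Int) × Int × Int :=
  (cells.map (fun p => (p.2, height - 1 - p.1)), width, height)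

def transform_alt (cells : List (Int × Int)) (rotation : Int) (flip_horizontal : Bool) : List (Int × Int) :=
  let cur := pvNormalizeA cells
  let height := (PySem.List.max? (cur.map (fun p => p.1)) (fun x => x)).getD 0 + 1
  let width := (PySem.List.max? (cur.map (fun p => p.2)) (fun x => x)).getD 0 + 1
  let cur := if flip_horizontal then cur.map (fun p => (p.1, width - 1 - p.2)) else cur
  if rotation = 0 ∨ rotation = 90 ∨ rotation = 180 ∨ rotation = 270 then
    let k := PySem.Int.floordiv rotation 90
    let st := (PySem.List.pyRange 0 k 1).foldl
      (fun (s : List (Int × Int) × Int × Int) _ => pvRotate90 s.1 s.2.1 s.2.2)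
      (cur, height, width)
    pvNormalizeA st.1
  else []  -- Python raises ValueError here; excluded by Pre_

-- ===== PRECONDITION & SPEC =====
-- Pre_ excludes exactly the inputs on which A raises: empty cells (min of empty sequence,
-- ValueError) and rotations outside {0, 90, 180, 270} (explicit ValueError).
def Pre_transform (cells : List (Int × Int)) (rotation : Int) (flip_horizontal : Bool) : Prop :=
  cells ≠ [] ∧ (rotation = 0 ∨ rotation = 90 ∨ rotation = 180 ∨ rotation = 270)
instance (cells : List (Int × Int)) (rotation : Int) (flip_horizontal : Bool) : Decidable (Pre_transform cells rotation flip_horizontal) := by unfold Pre_transform; infer_instance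

def pvWitness_transform : (List (Int × Int)) × Int × Bool := ([(0, 0), (0, 1), (1, 0)], 90, true)

def Spec_transform (cells : List (Int × Int)) (rotation : Int) (flip_horizontal : Bool) (out : List (Int × Int)) : Prop := out = transform_alt cells rotation flip_horizontal
instance (cells : List (Int × Int)) (rotation : Int) (flip_horizontal : Bool) (out : List (Int × Int)) : Decidable (Spec_transform cells rotation flip_horizontal out) := by unfold Spec_transform; infer_instance

-- ===== CLAIM (what is proved, stated in full; the proofs are below) =====
def Claim_equal_transform : Prop := ∀ (cells : List (Int × Int)) (rotation : Int) (flip_horizontal : Bool), Dom_transform cells rotation flip_horizontal → Pre_transform cells rotation flip_horizontal → Spec_transform cells rotation flip_horizontal (transform cells rotation flip_horizontal)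

-- ===== LEMMAS AND PROOFS =====

theorem transform_equal (cells : List (Int × Int)) (rotation : Int) (flip_horizontal : Bool)
    (h : Pre_transform cells rotation flip_horizontal) :
    transform cells rotation flip_horizontal = transform_alt cells rotation flip_horizontal := by
  obtain ⟨-, hrot⟩ := h
  rcases hrot with h0 | h90 | h180 | h270 <;> subst_vars <;>
    simp only [transform, transform_alt]
  · rw [show PySem.List.pyRange 0 (PySem.Int.floordiv 0 90) 1 = [] from by decide]
    simp only [if_true, List.foldl_nil]
    rw [PySem.List.foldl_append_singleton_eq_map]
    cases flip_horizontal <;> simp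
  · rw [show PySem.List.pyRange 0 (PySem.Int.floordiv 90 90) 1 = [0] from by decide]
    simp only [show ((90:Int) = 0) = False from by simp,      if_false, if_true, List.foldl_cons, List.foldl_nil, pvRotate90]
    rw [PySem.List.foldl_append_singleton_eq_map]
    congr 1
    cases flip_horizontal <;>
      simp only [Bool.false_eq_true, ite_false, ite_true, List.map_map] <;>
      apply List.map_congr_left <;> intro p _ <;>
      (simp; try omega)
  · rw [show PySem.List.pyRange 0 (PySem.Int.floordiv 180 90) 1 = [0, 1] from by decide]
    simp only [show ((180:Int) = 0) = False from by simp, show ((180:Int) = 90) = False from by simp,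
      if_false, if_true, List.foldl_cons, List.foldl_nil, pvRotate90]
    rw [PySem.List.foldl_append_singleton_eq_map]
    congr 1
    cases flip_horizontal <;>
      simp only [Bool.false_eq_true, ite_false, ite_true, List.map_map] <;>
      apply List.map_congr_left <;> intro p _ <;>
      (simp; try omega)
  · rw [show PySem.List.pyRange 0 (PySem.Int.floordiv 270 90) 1 = [0, 1, 2] from by decide]
    simp only [show ((270:Int) = 0) = False from by simp, show ((270:Int) = 90) = False from by simp,
      show ((270:Int) = 180) = False from by simp,      if_false, if_true, List.foldl_cons, List.foldl_nil, pvRotate90]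
    rw [PySem.List.foldl_append_singleton_eq_map]
    congr 1
    cases flip_horizontal <;>
      simp only [Bool.false_eq_true, ite_false, ite_true, List.map_map] <;>
      apply List.map_congr_left <;> intro p _ <;>
      (simp; try omega)

-- ===== VERDICT (by name: the statement is the Claim_ definition above) =====
theorem transform_spec : Claim_equal_transform := by
  intro cells rotation flip_horizontal _ hpre
  exact transform_equal cells rotation flip_horizontal hpre
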